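-- pv_equiv track=rewrite | github.com/amanalehegne/A2SV_PROGRAMMING | Contests/amazingContest.py | isAmazing
-- ===== SOURCE A (Python) =====
-- def isAmazing(contests, length):
--     high = contests[0]
--     low = contests[0]
--     count = 0
--     for i in range(1, length):
--         value = contests[i]
--         if value > high:
--             count += 1
--             high = value
--         elif value < low:
--             count += 1
--             low = value
--     return count
-- ===== SOURCE B (Python) =====
-- def isAmazing(contests, length):
--     first = contests[0]
--     values = [contests[i] for i in range(1, length)]
--     count = 0
--     high = first
--     for v in values:
--         if v > high:
--             count += 1
--             high = v
--     low = first
--     for v in values: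
--         if v < low:
--             count += 1
--             low = v
--     return count
-- ===== Notes on version B (the rewrite author's own statement) =====
-- stated objective: alternative
-- what changed: B decomposes the single stateful high/low loop into two independent passes: one counting strict prefix maxima, one counting strict prefix minima, summing the two counts (valid because a value can never be both a new high and a new low).
import Mathlib
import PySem

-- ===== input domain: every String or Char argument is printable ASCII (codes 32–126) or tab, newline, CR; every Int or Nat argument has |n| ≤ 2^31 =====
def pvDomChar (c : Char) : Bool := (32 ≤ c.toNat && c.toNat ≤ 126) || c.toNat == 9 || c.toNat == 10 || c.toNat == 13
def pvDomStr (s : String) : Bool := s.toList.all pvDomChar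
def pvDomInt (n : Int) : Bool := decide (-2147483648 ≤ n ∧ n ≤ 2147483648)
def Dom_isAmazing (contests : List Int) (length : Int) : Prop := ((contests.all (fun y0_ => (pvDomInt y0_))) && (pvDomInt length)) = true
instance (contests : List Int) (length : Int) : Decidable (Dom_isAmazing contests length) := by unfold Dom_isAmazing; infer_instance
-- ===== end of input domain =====

-- B replaces A's single stateful high/low loop by two independent passes (new-high count + new-low count); equivalence proved on Pre_ (A raises IndexError outside it).
-- ===== PORT A =====
def aStep (contests : List Int) (s : Int × Int × Int) (i : Int) : Int × Int × Int :=
  let value := (PySem.List.pyGet? contests i).getD 0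
  if value > s.1 then (value, s.2.1, s.2.2 + 1)
  else if value < s.2.1 then (s.1, value, s.2.2 + 1)
  else s

def isAmazing (contests : List Int) (length : Int) : Int :=
  let high := (PySem.List.pyGet? contests 0).getD 0
  let low := high
  ((PySem.List.pyRange 1 length 1).foldl (aStep contests) (high, low, 0)).2.2

-- ===== PORT B =====
def hiStep (s : Int × Int) (v : Int) : Int × Int := if v > s.1 then (v, s.2 + 1) else s
def loStep (s : Int × Int) (v : Int) : Int × Int := if v < s.1 then (v, s.2 + 1) else s

def isAmazing_alt (contests : List Int) (length : Int) : Int :=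
  let first := (PySem.List.pyGet? contests 0).getD 0
  let values := (PySem.List.pyRange 1 length 1).map (fun i => (PySem.List.pyGet? contests i).getD 0)
  let countHi := (values.foldl hiStep (first, 0)).2
  let countLo := (values.foldl loStep (first, 0)).2
  countHi + countLo

-- ===== PRECONDITION & SPEC =====
-- Pre_ excludes exactly the inputs where A raises IndexError: empty list (contests[0]) or length exceeding len(contests).
def Pre_isAmazing (contests : List Int) (length : Int) : Prop :=
  contests ≠ [] ∧ length ≤ (contests.length : Int)
instance (contests : List Int) (length : Int) : Decidable (Pre_isAmazing contests length) := by unfold Pre_isAmazing; infer_instance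
def pvWitness_isAmazing : List Int × Int := ([3, 1, 4, 1, 5], 5)
def Spec_isAmazing (contests : List Int) (length : Int) (out : Int) : Prop := out = isAmazing_alt contests length
instance (contests : List Int) (length : Int) (out : Int) : Decidable (Spec_isAmazing contests length out) := by unfold Spec_isAmazing; infer_instance

-- ===== CLAIM (what is proved, stated in full; the proofs are below) =====
def Claim_equal_isAmazing : Prop := ∀ (contests : List Int) (length : Int), Dom_isAmazing contests length → Pre_isAmazing contests length → Spec_isAmazing contests length (isAmazing contests length)

-- ===== LEMMAS AND PROOFS =====
theorem hiFold_snd (vals : List Int) : ∀ (h c : Int),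
    (vals.foldl hiStep (h, c)).2 = c + (vals.foldl hiStep (h, 0)).2 := by
  induction vals with
  | nil => intro h c; simp
  | cons v r ih =>
    intro h c
    simp only [List.foldl, hiStep]
    split_ifs
    · rw [ih _ (c + 1), ih _ (0 + 1)]; ring
    · rw [ih _ c]

theorem loFold_snd (vals : List Int) : ∀ (l c : Int),
    (vals.foldl loStep (l, c)).2 = c + (vals.foldl loStep (l, 0)).2 := by
  induction vals with
  | nil => intro l c; simp
  | cons v r ih =>
    intro l c
    simp only [List.foldl, loStep]
    split_ifs
    · rw [ih _ (c + 1), ih _ (0 + 1)]; ring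
    · rw [ih _ c]

theorem combined_split (contests : List Int) (idxs : List Int) :
    ∀ (high low count : Int), low ≤ high →
    (idxs.foldl (aStep contests) (high, low, count)).2.2
      = count
        + ((idxs.map (fun i => (PySem.List.pyGet? contests i).getD 0)).foldl hiStep (high, 0)).2
        + ((idxs.map (fun i => (PySem.List.pyGet? contests i).getD 0)).foldl loStep (low, 0)).2 := by
  induction idxs with
  | nil => intro high low count _; simp
  | cons i r ih =>
    intro high low count hlh
    simp only [List.map, List.foldl, aStep, hiStep, loStep]
    split_ifs with h1 h2 h2
    · omega
    · rw [ih _ low (count + 1) (by omega), hiFold_snd _ _ (0 + 1)]; ring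
    · rw [ih high _ (count + 1) (by omega), loFold_snd _ _ (0 + 1)]; ring
    · exact ih high low count hlh

-- ===== VERDICT (by name: the statement is the Claim_ definition above) =====
theorem isAmazing_spec : Claim_equal_isAmazing := by
  intro contests length _ _
  unfold Spec_isAmazing isAmazing isAmazing_alt
  simpa using combined_split contests (PySem.List.pyRange 1 length 1)
    ((PySem.List.pyGet? contests 0).getD 0) ((PySem.List.pyGet? contests 0).getD 0) 0 le_rfl
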